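-- pv_equiv track=rewrite | github.com/TimothyDJones/learn-python | codewars/remove_parentheses.py | remove_nested_parens
-- ===== SOURCE A (Python) =====
-- def remove_nested_parens(s):
--     """
--         Returns a copy of "s" with parenthesized text removed.
--         Nested paretheses are handled properly.
--     """
--
--     result = ""
--     paren_level = 0
--
--     for c in s:
--         if c == "(":
--             paren_level += 1
--         elif (c == ")") and paren_level:
--             paren_level -= 1
--         elif not paren_level:
--             result += c
--
--     return result
-- ===== SOURCE B (Python) =====
-- from itertools import accumulate
--
--
-- def remove_nested_parens(s):
--     """
--         Returns a copy of "s" with parenthesized text removed.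
--         Nested parentheses are handled properly.
--     """
--     def step(level, c):
--         if c == "(":
--             return level + 1
--         if c == ")" and level > 0:
--             return level - 1
--         return level
--
--     depths = accumulate(s, step, initial=0)
--     return "".join(c for c, lev in zip(s, depths) if lev == 0 and c != "(")
-- ===== Notes on version B (the rewrite author's own statement) =====
-- stated objective: alternative
-- what changed: Replaces the single mutable-counter loop that appends kept characters as it goes with a precomputed prefix table of before-character paren depths (itertools.accumulate with initial=0) followed by a separate filtering pass over zip(s, depths).
import Mathlib
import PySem

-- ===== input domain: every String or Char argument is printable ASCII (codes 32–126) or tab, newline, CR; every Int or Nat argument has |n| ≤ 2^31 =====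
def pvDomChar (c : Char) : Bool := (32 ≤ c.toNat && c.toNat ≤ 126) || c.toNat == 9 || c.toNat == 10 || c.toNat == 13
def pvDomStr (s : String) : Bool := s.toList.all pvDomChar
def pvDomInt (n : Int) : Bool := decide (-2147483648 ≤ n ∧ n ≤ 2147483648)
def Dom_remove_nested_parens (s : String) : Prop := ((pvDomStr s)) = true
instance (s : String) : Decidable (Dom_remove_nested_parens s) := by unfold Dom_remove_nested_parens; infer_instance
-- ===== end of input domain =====

-- B replaces A's single mutable-counter loop (append-as-you-go) with a precomputed
-- prefix table of before-character paren depths plus a separate filtering pass.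

-- ===== PORT A =====
-- state = (result, paren_level); one step of A's for-loop, branches in source order
def pvStepA (st : String × Int) (c : Char) : String × Int :=
  if c = '(' then (st.1, st.2 + 1)
  else if c = ')' ∧ st.2 ≠ 0 then (st.1, st.2 - 1)
  else if st.2 = 0 then (st.1.push c, st.2)
  else st

def remove_nested_parens (s : String) : String :=
  (s.toList.foldl pvStepA ("", 0)).1

-- ===== PORT B =====
-- accumulate's step function: depth after reading c, clamped at zero on ')'
def pvDepthStep (level : Int) (c : Char) : Int :=
  if c = '(' then level + 1
  else if c = ')' ∧ level > 0 then level - 1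
  else level

def remove_nested_parens_alt (s : String) : String :=
  -- depths = accumulate(s, step, initial=0): the before-char depth, aligned with each char by zip
  String.ofList (((s.toList.zip (s.toList.scanl pvDepthStep 0)).filter
      (fun p => p.2 = 0 ∧ p.1 ≠ '(')).map Prod.fst)

-- ===== PRECONDITION & SPEC =====
def Spec_remove_nested_parens (s : String) (out : String) : Prop := out = remove_nested_parens_alt s
instance (s : String) (out : String) : Decidable (Spec_remove_nested_parens s out) := by unfold Spec_remove_nested_parens; infer_instance

-- ===== CLAIM (what is proved, stated in full; the proofs are below) =====
def Claim_equal_remove_nested_parens : Prop := ∀ (s : String), Dom_remove_nested_parens s → Spec_remove_nested_parens s (remove_nested_parens s)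

-- ===== LEMMAS AND PROOFS =====

-- kept characters, computed recursively with the running before-char depth
def pvKeep (lvl : Int) : List Char → List Char
  | [] => []
  | c :: t =>
      (if lvl = 0 ∧ c ≠ '(' then [c] else []) ++ pvKeep (pvDepthStep lvl c) t

lemma zip_scanl_filter (l : List Char) (lvl : Int) :
    ((l.zip (l.scanl pvDepthStep lvl)).filter (fun p => p.2 = 0 ∧ p.1 ≠ '(')).map Prod.fst
      = pvKeep lvl l := by
  induction l generalizing lvl with
  | nil => simp [pvKeep]
  | cons c t ih =>
      simp only [List.scanl_cons, List.zip_cons_cons, List.filter_cons, pvKeep]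
      by_cases h : lvl = 0 ∧ c ≠ '('
      · obtain ⟨hz, hcne⟩ := h
        subst hz
        simp [hcne]
        simpa using ih (pvDepthStep 0 c)
      · simp [h]
        simpa using ih (pvDepthStep lvl c)

lemma foldl_stepA (l : List Char) (res : String) (lvl : Int) (hlvl : 0 ≤ lvl) :
    (l.foldl pvStepA (res, lvl)).1 = String.ofList (res.toList ++ pvKeep lvl l) := by
  induction l generalizing res lvl with
  | nil => simp [pvKeep]
  | cons c t ih =>
      simp only [List.foldl_cons, pvKeep]
      by_cases hp : c = '('
      · have : pvStepA (res, lvl) c = (res, lvl + 1) := by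
          simp [pvStepA, hp]
        rw [this, ih res (lvl + 1) (by omega)]
        simp [pvDepthStep, hp]
      · by_cases hq : c = ')' ∧ lvl ≠ 0
        · have : pvStepA (res, lvl) c = (res, lvl - 1) := by
            simp [pvStepA, hq.1, hq.2]
          rw [this, ih res (lvl - 1) (by omega)]
          have hz : ¬ lvl = 0 := hq.2
          simp [pvDepthStep, hq.1, hz, show lvl > 0 by omega]
        · by_cases hz : lvl = 0
          · subst hz
            have : pvStepA (res, 0) c = (res.push c, 0) := by
              simp [pvStepA, hp]
            rw [this, ih (res.push c) 0 le_rfl]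
            have hstep : pvDepthStep 0 c = 0 := by
              simp [pvDepthStep, hp]
            simp [hstep, hp]
          · have hc : ¬ c = ')' := fun h => hq ⟨h, hz⟩
            have : pvStepA (res, lvl) c = (res, lvl) := by
              simp [pvStepA, hp, hc, hz]
            rw [this, ih res lvl hlvl]
            have hstep : pvDepthStep lvl c = lvl := by
              simp [pvDepthStep, hp, hc]
            simp [hstep, hz]

-- ===== VERDICT (by name: the statement is the Claim_ definition above) =====
theorem remove_nested_parens_spec : Claim_equal_remove_nested_parens := by
  intro s _
  show remove_nested_parens s = remove_nested_parens_alt s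
  unfold remove_nested_parens remove_nested_parens_alt
  rw [foldl_stepA s.toList "" 0 le_rfl, zip_scanl_filter]
  simp
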